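-- pv_equiv track=rewrite | github.com/ika-rwth-aachen/omega_format | omega_format/converters/from_asam_opendrive/opendriveconverter/elements/junction.py | lookup_table_search
-- ===== SOURCE A (Python) =====
-- def lookup_table_search(opendrive_road_id, opendrive_lane_section_id, opendrive_lane_id, lookup_table, first_run):
--     """
--     look for VVM road id and VVM lane id that corresponds with the given opendrive road ,lane section and lane id
--     if not found, search recursively in other lanesections of that road
--     :param opendrive_road_id:
--     :param opendrive_lane_section_id:
--     :param opendrive_lane_id:
--     :param lookup_table:
--     :param first_run:
--     :return: if found, the row number, if nothing was found - nothing is returned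
--     """
--     counter = -1
--     for row in lookup_table:
--         counter += 1
--         if row[0] == opendrive_road_id:
--             if row[1] == opendrive_lane_section_id:
--                 if row[2] == opendrive_lane_id:
--                     # found lane, return counter (row number)
--                     return counter
--
--     # if not found check if lane is in different lane section (work around solution, since not clear how to find out
--     # beforehand in which road section lane is, check if road has different lane sections
--     if first_run:
--         max_lane_section = find_max_lane_section(opendrive_road_id, lookup_table)
--         # run function for all found lane sections (forward and backward for beginning and end)
--         for i in range(opendrive_lane_section_id + 1, max_lane_section + 1):
--             # forward search
--             row_number = lookup_table_search(opendrive_road_id, i, opendrive_lane_id, lookup_table, False)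
--             if row_number is not None:
--                 return row_number
--         for i in range(opendrive_lane_section_id - 1, -1, -1):
--             # backward search
--             row_number = lookup_table_search(opendrive_road_id, i, opendrive_lane_id, lookup_table, False)
--             if row_number is not None:
--                 return row_number
--
--     return None
--
-- def find_max_lane_section(opendrive_road_id, lookup_table):
--     """
--     finds the maximum amount of lane sections for a certain road
--     :param opendrive_road_id:
--     :param lookup_table:
--     :return:
--     """
--     max_lane_section = 0
--     for row in lookup_table:
--         if row[0] == opendrive_road_id:
--             if row[1] > max_lane_section:
--                 max_lane_section = row[1]
--     return max_lane_section
-- ===== SOURCE B (Python) =====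
-- def lookup_table_search(opendrive_road_id, opendrive_lane_section_id, opendrive_lane_id, lookup_table, first_run):
--     """Single linear pass: return the first exact (road, section, lane) row immediately;
--     otherwise track the best fallback row above (smallest section > target, earliest row)
--     and below (largest section in [0, target), earliest row), used only on first_run."""
--     above = None  # (section, row number), section minimal, then earliest
--     below = None  # (section, row number), section maximal (>= 0), then earliest
--     for idx, row in enumerate(lookup_table):
--         if row[0] != opendrive_road_id or row[2] != opendrive_lane_id:
--             continue
--         s = row[1]
--         if s == opendrive_lane_section_id:
--             return idx
--         elif s > opendrive_lane_section_id:
--             if above is None or s < above[0]: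
--                 above = (s, idx)
--         elif s >= 0:
--             if below is None or s > below[0]:
--                 below = (s, idx)
--     if first_run:
--         if above is not None:
--             return above[1]
--         if below is not None:
--             return below[1]
--     return None
-- ===== Notes on version B (the rewrite author's own statement) =====
-- stated objective: alternative
-- what changed: Replaces A's recursion that rescans the whole table once per neighbouring lane section (plus a separate max-lane-section pass) by a single linear pass that returns the first exact (road, section, lane) row immediately and otherwise tracks the best fallback row above (smallest section > target, earliest row) and below (largest section in [0, target), earliest row).
-- outside the precondition, e.g. on lookup_table_search(1, 0, 0, [[1, 0, 0], []], False): A returns 0, B returns 0; on lookup_table_search(1, 0, 0, [[1, 5]], False): A returns None, B raises IndexError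
import Mathlib
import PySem

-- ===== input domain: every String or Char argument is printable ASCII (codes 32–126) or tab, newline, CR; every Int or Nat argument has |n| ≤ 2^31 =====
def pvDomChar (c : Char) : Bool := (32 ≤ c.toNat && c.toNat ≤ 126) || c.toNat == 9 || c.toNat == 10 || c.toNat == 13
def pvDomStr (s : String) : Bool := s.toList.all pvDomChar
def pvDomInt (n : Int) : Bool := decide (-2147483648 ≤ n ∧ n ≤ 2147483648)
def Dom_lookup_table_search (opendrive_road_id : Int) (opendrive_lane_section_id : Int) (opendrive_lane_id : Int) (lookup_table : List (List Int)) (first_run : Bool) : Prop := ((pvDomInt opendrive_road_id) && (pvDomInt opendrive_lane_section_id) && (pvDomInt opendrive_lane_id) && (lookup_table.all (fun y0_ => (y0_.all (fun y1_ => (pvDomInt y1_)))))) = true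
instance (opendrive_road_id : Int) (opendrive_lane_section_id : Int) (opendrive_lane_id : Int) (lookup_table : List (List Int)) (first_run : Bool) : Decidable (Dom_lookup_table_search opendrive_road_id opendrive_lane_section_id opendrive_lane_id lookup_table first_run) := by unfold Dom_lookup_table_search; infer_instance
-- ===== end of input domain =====

-- B replaces A's rescans of the table (recursion over every neighbouring lane section) by one
-- linear pass that tracks the best fallback row above and below the target section (objective: alternative).


-- ===== PORT A =====
-- the scan loop of A ('counter = -1; for row in lookup_table: counter += 1; if row[0]==…').
-- row[i] is PySem.List.pyGet?; the 'none' (IndexError) case never matches, which is exact on Pre_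
-- (outside Pre_ Python raises and nothing is claimed).
def pvFindRow (road s lane : Int) : List (List Int) → Int → Option Int
  | [], _ => none
  | row :: rest, counter =>
      if PySem.List.pyGet? row 0 = some road then
        if PySem.List.pyGet? row 1 = some s then
          if PySem.List.pyGet? row 2 = some lane then some (counter + 1)
          else pvFindRow road s lane rest (counter + 1)
        else pvFindRow road s lane rest (counter + 1)
      else pvFindRow road s lane rest (counter + 1)

-- A's helper find_max_lane_section; '.getD 0' stands for row[1], only reached outside Pre_ when it is none
def find_max_lane_section (opendrive_road_id : Int) (lookup_table : List (List Int)) : Int :=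
  lookup_table.foldl (fun m row =>
    if PySem.List.pyGet? row 0 = some opendrive_road_id then
      if (PySem.List.pyGet? row 1).getD 0 > m then (PySem.List.pyGet? row 1).getD 0 else m
    else m) 0

-- 'for i in range(…): r = lookup_table_search(…, False); if r is not None: return r' is List.findSome?
def lookup_table_search (opendrive_road_id : Int) (opendrive_lane_section_id : Int) (opendrive_lane_id : Int) (lookup_table : List (List Int)) (first_run : Bool) : Option Int :=
  match pvFindRow opendrive_road_id opendrive_lane_section_id opendrive_lane_id lookup_table (-1) with
  | some c => some c
  | none =>
    if first_run then
      let max_lane_section := find_max_lane_section opendrive_road_id lookup_table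
      match (PySem.List.pyRange (opendrive_lane_section_id + 1) (max_lane_section + 1) 1).findSome?
              (fun i => lookup_table_search opendrive_road_id i opendrive_lane_id lookup_table false) with
      | some r => some r
      | none =>
        match (PySem.List.pyRange (opendrive_lane_section_id - 1) (-1) (-1)).findSome?
                (fun i => lookup_table_search opendrive_road_id i opendrive_lane_id lookup_table false) with
        | some r => some r
        | none => none
    else none
termination_by (if first_run then 1 else 0)
decreasing_by all_goals simp_all

-- ===== PORT B =====
-- B's single loop: early return on the exact section; otherwise track
-- above = (section, row number) with minimal section > target (earliest row on ties) and
-- below = (section, row number) with maximal section in [0, target) (earliest row on ties).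
def pvAltLoop (road sec lane : Int) (first_run : Bool) :
    List (List Int) → Int → Option (Int × Int) → Option (Int × Int) → Option Int
  | [], _, above, below =>
      if first_run then
        match above with
        | some p => some p.2
        | none =>
          match below with
          | some p => some p.2
          | none => none
      else none
  | row :: rest, idx, above, below =>
      if PySem.List.pyGet? row 0 ≠ some road ∨ PySem.List.pyGet? row 2 ≠ some lane then
        pvAltLoop road sec lane first_run rest (idx + 1) above below
      else
        let s := (PySem.List.pyGet? row 1).getD 0
        if s = sec then some idx
        else if s > sec then
          pvAltLoop road sec lane first_run rest (idx + 1)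
            (match above with
             | none => some (s, idx)
             | some p => if s < p.1 then some (s, idx) else some p) below
        else if s ≥ 0 then
          pvAltLoop road sec lane first_run rest (idx + 1) above
            (match below with
             | none => some (s, idx)
             | some p => if s > p.1 then some (s, idx) else some p)
        else pvAltLoop road sec lane first_run rest (idx + 1) above below

def lookup_table_search_alt (opendrive_road_id : Int) (opendrive_lane_section_id : Int) (opendrive_lane_id : Int) (lookup_table : List (List Int)) (first_run : Bool) : Option Int :=
  pvAltLoop opendrive_road_id opendrive_lane_section_id opendrive_lane_id first_run lookup_table 0 none none

-- ===== PRECONDITION & SPEC =====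
def pvRowOK (road : Int) (row : List Int) : Prop :=
  row ≠ [] ∧ (row.head? = some road → 3 ≤ row.length)

-- Pre_ excludes tables containing an empty row or a row that starts with the searched road id but has
-- fewer than 3 entries: on such malformed rows A raises IndexError depending on scan order (and where
-- it happens to return first, which rows get inspected is an accident of evaluation order).
def Pre_lookup_table_search (opendrive_road_id : Int) (opendrive_lane_section_id : Int) (opendrive_lane_id : Int) (lookup_table : List (List Int)) (first_run : Bool) : Prop :=
  ∀ row ∈ lookup_table, pvRowOK opendrive_road_id row

instance (opendrive_road_id : Int) (opendrive_lane_section_id : Int) (opendrive_lane_id : Int) (lookup_table : List (List Int)) (first_run : Bool) : Decidable (Pre_lookup_table_search opendrive_road_id opendrive_lane_section_id opendrive_lane_id lookup_table first_run) := by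
  unfold Pre_lookup_table_search pvRowOK; infer_instance

def pvWitness_lookup_table_search : Int × Int × Int × List (List Int) × Bool :=
  (1, 0, 2, [[1, 3, 2], [1, 1, 2], [2, 0, 2]], true)

def Spec_lookup_table_search (opendrive_road_id : Int) (opendrive_lane_section_id : Int) (opendrive_lane_id : Int) (lookup_table : List (List Int)) (first_run : Bool) (out : Option Int) : Prop := out = lookup_table_search_alt opendrive_road_id opendrive_lane_section_id opendrive_lane_id lookup_table first_run
instance (opendrive_road_id : Int) (opendrive_lane_section_id : Int) (opendrive_lane_id : Int) (lookup_table : List (List Int)) (first_run : Bool) (out : Option Int) : Decidable (Spec_lookup_table_search opendrive_road_id opendrive_lane_section_id opendrive_lane_id lookup_table first_run out) := by unfold Spec_lookup_table_search; infer_instance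

-- ===== CLAIM (what is proved, stated in full; the proofs are below) =====
def Claim_equal_lookup_table_search : Prop := ∀ (opendrive_road_id : Int) (opendrive_lane_section_id : Int) (opendrive_lane_id : Int) (lookup_table : List (List Int)) (first_run : Bool), Dom_lookup_table_search opendrive_road_id opendrive_lane_section_id opendrive_lane_id lookup_table first_run → Pre_lookup_table_search opendrive_road_id opendrive_lane_section_id opendrive_lane_id lookup_table first_run → Spec_lookup_table_search opendrive_road_id opendrive_lane_section_id opendrive_lane_id lookup_table first_run (lookup_table_search opendrive_road_id opendrive_lane_section_id opendrive_lane_id lookup_table first_run)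

-- ===== LEMMAS AND PROOFS =====

-- pvWitness satisfies Dom ∧ Pre
theorem pvWitness_ok :
    Dom_lookup_table_search (pvWitness_lookup_table_search.1) (pvWitness_lookup_table_search.2.1) (pvWitness_lookup_table_search.2.2.1) (pvWitness_lookup_table_search.2.2.2.1) (pvWitness_lookup_table_search.2.2.2.2) ∧
    Pre_lookup_table_search (pvWitness_lookup_table_search.1) (pvWitness_lookup_table_search.2.1) (pvWitness_lookup_table_search.2.2.1) (pvWitness_lookup_table_search.2.2.2.1) (pvWitness_lookup_table_search.2.2.2.2) := by
  decide

-- the candidate view of a row: 'some s' iff the row matches the road and lane, with s its section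
def pvCand (road lane : Int) (row : List Int) : Option Int :=
  if PySem.List.pyGet? row 0 = some road ∧ PySem.List.pyGet? row 2 = some lane
  then some ((PySem.List.pyGet? row 1).getD 0) else none

-- first index (counting from c) whose row is a candidate with section exactly s
def pvFindCand (road lane s : Int) : List (List Int) → Int → Option Int
  | [], _ => none
  | row :: rest, c => if pvCand road lane row = some s then some c else pvFindCand road lane s rest (c + 1)

-- left-biased min / max merge on optional (section, index) pairs
def pvMergeA : Option (Int × Int) → Option (Int × Int) → Option (Int × Int)
  | none, y => y
  | some p, none => some p
  | some p, some q => if q.1 < p.1 then some q else some p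

def pvMergeB : Option (Int × Int) → Option (Int × Int) → Option (Int × Int)
  | none, y => y
  | some p, none => some p
  | some p, some q => if q.1 > p.1 then some q else some p

def pvAboveMin (road lane sec : Int) : List (List Int) → Int → Option (Int × Int)
  | [], _ => none
  | row :: rest, idx =>
      pvMergeA
        (match pvCand road lane row with
         | some s => if sec < s then some (s, idx) else none
         | none => none)
        (pvAboveMin road lane sec rest (idx + 1))

def pvBelowMax (road lane sec : Int) : List (List Int) → Int → Option (Int × Int)
  | [], _ => none
  | row :: rest, idx =>
      pvMergeB
        (match pvCand road lane row with
         | some s => if 0 ≤ s ∧ s < sec then some (s, idx) else none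
         | none => none)
        (pvBelowMax road lane sec rest (idx + 1))

theorem pvMergeA_none_right (x : Option (Int × Int)) : pvMergeA x none = x := by
  cases x <;> rfl

theorem pvMergeB_none_right (x : Option (Int × Int)) : pvMergeB x none = x := by
  cases x <;> rfl

theorem pvMergeA_assoc (x y z : Option (Int × Int)) :
    pvMergeA (pvMergeA x y) z = pvMergeA x (pvMergeA y z) := by
  rcases x with _ | ⟨xa, xb⟩ <;> rcases y with _ | ⟨ya, yb⟩ <;> rcases z with _ | ⟨za, zb⟩ <;>
    try rfl
  all_goals try simp [pvMergeA_none_right]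
  all_goals (
    by_cases h1 : ya < xa <;> by_cases h2 : za < ya <;> by_cases h3 : za < xa <;>
      simp [pvMergeA, h1, h2, h3] <;> omega)

theorem pvMergeB_assoc (x y z : Option (Int × Int)) :
    pvMergeB (pvMergeB x y) z = pvMergeB x (pvMergeB y z) := by
  rcases x with _ | ⟨xa, xb⟩ <;> rcases y with _ | ⟨ya, yb⟩ <;> rcases z with _ | ⟨za, zb⟩ <;>
    try rfl
  all_goals try simp [pvMergeB_none_right]
  all_goals (
    by_cases h1 : ya > xa <;> by_cases h2 : za > ya <;> by_cases h3 : za > xa <;>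
      simp [pvMergeB, h1, h2, h3] <;> omega)

-- master characterization of B's loop
theorem altLoop_eq (road sec lane : Int) (fr : Bool) :
    ∀ (l : List (List Int)) (idx : Int) (above below : Option (Int × Int)),
    pvAltLoop road sec lane fr l idx above below =
      match pvFindCand road lane sec l idx with
      | some j => some j
      | none =>
          if fr then
            match pvMergeA above (pvAboveMin road lane sec l idx) with
            | some p => some p.2
            | none =>
              match pvMergeB below (pvBelowMax road lane sec l idx) with
              | some p => some p.2
              | none => none
          else none := by
  intro l
  induction l with
  | nil =>
    intro idx above below
    cases above <;> cases below <;>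
      simp [pvAltLoop, pvFindCand, pvAboveMin, pvBelowMax, pvMergeA, pvMergeB]
  | cons row rest ih =>
    intro idx above below
    by_cases hc : PySem.List.pyGet? row 0 = some road ∧ PySem.List.pyGet? row 2 = some lane
    · have hskip : ¬ (PySem.List.pyGet? row 0 ≠ some road ∨ PySem.List.pyGet? row 2 ≠ some lane) := by
        simp [hc.1, hc.2]
      have hcand : pvCand road lane row = some ((PySem.List.pyGet? row 1).getD 0) := by
        simp [pvCand, hc]
      by_cases h1 : (PySem.List.pyGet? row 1).getD 0 = sec
      · simp only [pvAltLoop, if_neg hskip, pvFindCand, hcand, h1]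
        simp
      · by_cases h2 : (PySem.List.pyGet? row 1).getD 0 > sec
        · have hub : (match above with
              | none => some ((PySem.List.pyGet? row 1).getD 0, idx)
              | some p => if (PySem.List.pyGet? row 1).getD 0 < p.1
                  then some ((PySem.List.pyGet? row 1).getD 0, idx) else some p) =
              pvMergeA above (some ((PySem.List.pyGet? row 1).getD 0, idx)) := by
            cases above <;> rfl
          have hne : pvCand road lane row ≠ some sec := by simp [hcand, h1]
          simp only [pvAltLoop, if_neg hskip, if_neg h1, if_pos h2, hub]
          rw [ih]
          simp only [pvFindCand, if_neg hne, pvAboveMin, pvBelowMax, hcand]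
          rw [if_pos h2]
          have hg : ¬ (0 ≤ (PySem.List.pyGet? row 1).getD 0 ∧ (PySem.List.pyGet? row 1).getD 0 < sec) := by
            omega
          rw [if_neg hg, pvMergeA_assoc]
          simp [h1, pvMergeA, pvMergeB]
        · by_cases h3 : (PySem.List.pyGet? row 1).getD 0 ≥ 0
          · have hub : (match below with
                | none => some ((PySem.List.pyGet? row 1).getD 0, idx)
                | some p => if (PySem.List.pyGet? row 1).getD 0 > p.1
                    then some ((PySem.List.pyGet? row 1).getD 0, idx) else some p) =
                pvMergeB below (some ((PySem.List.pyGet? row 1).getD 0, idx)) := by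
              cases below <;> rfl
            have hne : pvCand road lane row ≠ some sec := by simp [hcand, h1]
            simp only [pvAltLoop, if_neg hskip, if_neg h1, if_neg h2, if_pos h3, hub]
            rw [ih]
            simp only [pvFindCand, if_neg hne, pvAboveMin, pvBelowMax, hcand]
            have hg : ¬ sec < (PySem.List.pyGet? row 1).getD 0 := h2
            rw [if_neg hg]
            have hg2 : (0 ≤ (PySem.List.pyGet? row 1).getD 0 ∧ (PySem.List.pyGet? row 1).getD 0 < sec) := by
              omega
            rw [if_pos hg2, pvMergeB_assoc]
            simp [h1, pvMergeA, pvMergeB]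
          · have hne : pvCand road lane row ≠ some sec := by simp [hcand, h1]
            simp only [pvAltLoop, if_neg hskip, if_neg h1, if_neg h2, if_neg h3]
            rw [ih]
            simp only [pvFindCand, if_neg hne, pvAboveMin, pvBelowMax, hcand]
            have hg : ¬ sec < (PySem.List.pyGet? row 1).getD 0 := h2
            rw [if_neg hg]
            have hg2 : ¬ (0 ≤ (PySem.List.pyGet? row 1).getD 0 ∧ (PySem.List.pyGet? row 1).getD 0 < sec) := by
              omega
            rw [if_neg hg2]
            simp [pvMergeA, pvMergeB, h1]
    · have hskip : (PySem.List.pyGet? row 0 ≠ some road ∨ PySem.List.pyGet? row 2 ≠ some lane) := by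
        tauto
      have hcand : pvCand road lane row = none := by simp [pvCand]; tauto
      simp only [pvAltLoop, if_pos hskip]
      rw [ih]
      simp only [pvFindCand, hcand, pvAboveMin, pvBelowMax]
      simp [pvMergeA, pvMergeB]

-- A's scan equals pvFindCand on well-formed rows
theorem pvFindRow_eq (road s lane : Int) :
    ∀ (l : List (List Int)) (c : Int), (∀ row ∈ l, pvRowOK road row) →
    pvFindRow road s lane l c = pvFindCand road lane s l (c + 1) := by
  intro l
  induction l with
  | nil => intro c _; rfl
  | cons row rest ih =>
    intro c hok
    have hrest : ∀ r ∈ rest, pvRowOK road r := fun r hr => hok r (List.mem_cons_of_mem _ hr)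
    have hrow := hok row (List.mem_cons_self)
    by_cases hr0 : PySem.List.pyGet? row 0 = some road
    · rcases row with _ | ⟨a, row'⟩
      · exact absurd rfl hrow.1
      have ha : PySem.List.pyGet? (a :: row') 0 = some a := by
        simp [PySem.List.pyGet?, PySem.List.pyIdx?]
      have haa : a = road := by rw [ha] at hr0; exact Option.some.inj hr0
      have h3 : 3 ≤ (a :: row').length := hrow.2 (by simp [haa])
      rcases row' with _ | ⟨b, row''⟩
      · simp at h3
      rcases row'' with _ | ⟨c2, t⟩
      · simp at h3
      have g1 : PySem.List.pyGet? (a::b::c2::t) 1 = some b := by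
        simp [PySem.List.pyGet?, PySem.List.pyIdx?]; split_ifs <;> simp_all <;> omega
      have g2 : PySem.List.pyGet? (a::b::c2::t) 2 = some c2 := by
        simp [PySem.List.pyGet?, PySem.List.pyIdx?]; split_ifs <;> simp_all <;> omega
      subst haa
      by_cases hb : b = s <;> by_cases hc2 : c2 = lane <;>
        simp only [pvFindRow, pvFindCand, pvCand, ha, g1, g2] <;>
        simp [hb, hc2, ih (c + 1) hrest]
    · have hcnone : pvCand road lane row = none := by
        unfold pvCand
        rw [if_neg]
        intro hcontra
        exact hr0 hcontra.1
      simp only [pvFindRow, if_neg hr0, pvFindCand, hcnone]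
      simpa using ih (c + 1) hrest

theorem lts_false_eq (road s lane : Int) (table : List (List Int))
    (h : ∀ row ∈ table, pvRowOK road row) :
    lookup_table_search road s lane table false = pvFindCand road lane s table 0 := by
  rw [lookup_table_search, pvFindRow_eq road s lane table (-1) h]
  norm_num
  cases hf : pvFindCand road lane s table 0 <;> simp [hf]

theorem pvFindCand_some (road lane s : Int) :
    ∀ (l : List (List Int)) (c j : Int), pvFindCand road lane s l c = some j →
    ∃ row ∈ l, pvCand road lane row = some s := by
  intro l
  induction l with
  | nil => intro c j h; simp [pvFindCand] at h
  | cons row rest ih =>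
    intro c j h
    by_cases hc : pvCand road lane row = some s
    · exact ⟨row, List.mem_cons_self, hc⟩
    · rw [pvFindCand, if_neg hc] at h
      obtain ⟨r, hr, hcr⟩ := ih (c + 1) j h
      exact ⟨r, List.mem_cons_of_mem _ hr, hcr⟩

theorem pvCand_some_iff (road lane : Int) (row : List Int) (s : Int) :
    pvCand road lane row = some s ↔
      (PySem.List.pyGet? row 0 = some road ∧ PySem.List.pyGet? row 2 = some lane ∧
        (PySem.List.pyGet? row 1).getD 0 = s) := by
  unfold pvCand
  split_ifs with h <;> simp_all

theorem pvMergeA_eq_none (x y : Option (Int × Int)) :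
    pvMergeA x y = none ↔ x = none ∧ y = none := by
  cases x <;> cases y <;> simp [pvMergeA] <;> split_ifs <;> simp

theorem pvMergeB_eq_none (x y : Option (Int × Int)) :
    pvMergeB x y = none ↔ x = none ∧ y = none := by
  cases x <;> cases y <;> simp [pvMergeB] <;> split_ifs <;> simp

-- every candidate section is bounded by find_max_lane_section
theorem fmax_ge (road lane : Int) (table : List (List Int)) :
    ∀ row ∈ table, ∀ s, pvCand road lane row = some s → s ≤ find_max_lane_section road table := by
  have aux : ∀ (l : List (List Int)) (acc : Int),
      acc ≤ List.foldl (fun m row =>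
          if PySem.List.pyGet? row 0 = some road then
            if (PySem.List.pyGet? row 1).getD 0 > m then (PySem.List.pyGet? row 1).getD 0 else m
          else m) acc l ∧
      ∀ row ∈ l, PySem.List.pyGet? row 0 = some road →
        (PySem.List.pyGet? row 1).getD 0 ≤ List.foldl (fun m row =>
          if PySem.List.pyGet? row 0 = some road then
            if (PySem.List.pyGet? row 1).getD 0 > m then (PySem.List.pyGet? row 1).getD 0 else m
          else m) acc l := by
    intro l
    induction l with
    | nil => intro acc; exact ⟨le_refl _, by simp⟩
    | cons row rest ih =>
      intro acc
      have hstep : acc ≤ (if PySem.List.pyGet? row 0 = some road then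
            if (PySem.List.pyGet? row 1).getD 0 > acc then (PySem.List.pyGet? row 1).getD 0 else acc
          else acc) := by split_ifs <;> omega
      constructor
      · exact le_trans hstep (ih _).1
      · intro r hr hroad
        rcases List.mem_cons.mp hr with rfl | hr'
        · refine le_trans ?_ (ih _).1
          simp only [hroad, if_true]
          split_ifs <;> simp_all <;> omega
        · exact (ih _).2 r hr' hroad
  intro row hrow s hc
  rw [pvCand_some_iff] at hc
  unfold find_max_lane_section
  have := (aux table 0).2 row hrow hc.1
  omega

theorem pvAboveMin_none (road lane sec : Int) :
    ∀ (l : List (List Int)) (idx : Int), pvAboveMin road lane sec l idx = none →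
    ∀ row ∈ l, ∀ s, pvCand road lane row = some s → ¬ sec < s := by
  intro l
  induction l with
  | nil => intro idx _ row h; simp at h
  | cons row rest ih =>
    intro idx h
    rw [pvAboveMin, pvMergeA_eq_none] at h
    intro r hr s hc hlt
    rcases List.mem_cons.mp hr with rfl | hr'
    · rw [hc] at h
      simp [hlt] at h
    · exact ih (idx + 1) h.2 r hr' s hc hlt

theorem pvAboveMin_some (road lane sec : Int) :
    ∀ (l : List (List Int)) (idx : Int) (p : Int × Int), pvAboveMin road lane sec l idx = some p →
    sec < p.1 ∧ pvFindCand road lane p.1 l idx = some p.2 ∧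
      (∀ row ∈ l, ∀ s, pvCand road lane row = some s → sec < s → p.1 ≤ s) := by
  intro l
  induction l with
  | nil => intro idx p h; simp [pvAboveMin] at h
  | cons row rest ih =>
    intro idx p h
    rw [pvAboveMin] at h
    cases e1 : pvCand road lane row with
    | none =>
      rw [e1] at h
      simp only [pvMergeA] at h
      obtain ⟨h1, h2, h3⟩ := ih (idx + 1) p h
      refine ⟨h1, ?_, ?_⟩
      · rw [pvFindCand, if_neg (by rw [e1]; simp)]
        exact h2
      · intro r hr s hc hlt
        rcases List.mem_cons.mp hr with rfl | hr'
        · rw [e1] at hc; simp at hc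
        · exact h3 r hr' s hc hlt
    | some s0 =>
      rw [e1] at h
      dsimp only at h
      by_cases hg : sec < s0
      · rw [if_pos hg] at h
        cases e2 : pvAboveMin road lane sec rest (idx + 1) with
        | none =>
          rw [e2] at h
          simp only [pvMergeA] at h
          have hp : p = (s0, idx) := by exact (Option.some.inj h).symm
          subst hp
          refine ⟨hg, ?_, ?_⟩
          · rw [pvFindCand, if_pos e1]
          · intro r hr s hc hlt
            rcases List.mem_cons.mp hr with rfl | hr'
            · rw [e1] at hc; simp at hc; omega
            · exact absurd hlt (pvAboveMin_none road lane sec rest (idx + 1) e2 r hr' s hc)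
        | some q =>
          rw [e2] at h
          obtain ⟨hq1, hq2, hq3⟩ := ih (idx + 1) q e2
          simp only [pvMergeA] at h
          by_cases hlt : q.1 < s0
          · rw [if_pos hlt] at h
            have hp : p = q := (Option.some.inj h).symm
            subst hp
            refine ⟨hq1, ?_, ?_⟩
            · rw [pvFindCand, if_neg (by rw [e1]; intro hx; have := Option.some.inj hx; omega)]
              exact hq2
            · intro r hr s hc hs
              rcases List.mem_cons.mp hr with rfl | hr'
              · rw [e1] at hc; have := Option.some.inj hc; omega
              · exact hq3 r hr' s hc hs
          · rw [if_neg hlt] at h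
            have hp : p = (s0, idx) := (Option.some.inj h).symm
            subst hp
            refine ⟨hg, ?_, ?_⟩
            · rw [pvFindCand, if_pos e1]
            · intro r hr s hc hs
              rcases List.mem_cons.mp hr with rfl | hr'
              · rw [e1] at hc; have := Option.some.inj hc; omega
              · have := hq3 r hr' s hc hs; simp; omega
      · rw [if_neg hg] at h
        simp only [pvMergeA] at h
        obtain ⟨h1, h2, h3⟩ := ih (idx + 1) p h
        refine ⟨h1, ?_, ?_⟩
        · rw [pvFindCand, if_neg (by rw [e1]; intro hx; have := Option.some.inj hx; omega)]
          exact h2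
        · intro r hr s hc hs
          rcases List.mem_cons.mp hr with rfl | hr'
          · rw [e1] at hc; have := Option.some.inj hc; omega
          · exact h3 r hr' s hc hs

theorem pvBelowMax_none (road lane sec : Int) :
    ∀ (l : List (List Int)) (idx : Int), pvBelowMax road lane sec l idx = none →
    ∀ row ∈ l, ∀ s, pvCand road lane row = some s → ¬ (0 ≤ s ∧ s < sec) := by
  intro l
  induction l with
  | nil => intro idx _ row h; simp at h
  | cons row rest ih =>
    intro idx h
    rw [pvBelowMax, pvMergeB_eq_none] at h
    intro r hr s hc hlt
    rcases List.mem_cons.mp hr with rfl | hr'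
    · rw [hc] at h
      simp [hlt] at h
    · exact ih (idx + 1) h.2 r hr' s hc hlt

theorem pvBelowMax_some (road lane sec : Int) :
    ∀ (l : List (List Int)) (idx : Int) (p : Int × Int), pvBelowMax road lane sec l idx = some p →
    (0 ≤ p.1 ∧ p.1 < sec) ∧ pvFindCand road lane p.1 l idx = some p.2 ∧
      (∀ row ∈ l, ∀ s, pvCand road lane row = some s → 0 ≤ s → s < sec → s ≤ p.1) := by
  intro l
  induction l with
  | nil => intro idx p h; simp [pvBelowMax] at h
  | cons row rest ih =>
    intro idx p h
    rw [pvBelowMax] at h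
    cases e1 : pvCand road lane row with
    | none =>
      rw [e1] at h
      simp only [pvMergeB] at h
      obtain ⟨h1, h2, h3⟩ := ih (idx + 1) p h
      refine ⟨h1, ?_, ?_⟩
      · rw [pvFindCand, if_neg (by rw [e1]; simp)]
        exact h2
      · intro r hr s hc hs0 hs1
        rcases List.mem_cons.mp hr with rfl | hr'
        · rw [e1] at hc; simp at hc
        · exact h3 r hr' s hc hs0 hs1
    | some s0 =>
      rw [e1] at h
      dsimp only at h
      by_cases hg : 0 ≤ s0 ∧ s0 < sec
      · rw [if_pos hg] at h
        cases e2 : pvBelowMax road lane sec rest (idx + 1) with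
        | none =>
          rw [e2] at h
          simp only [pvMergeB] at h
          have hp : p = (s0, idx) := (Option.some.inj h).symm
          subst hp
          refine ⟨hg, ?_, ?_⟩
          · rw [pvFindCand, if_pos e1]
          · intro r hr s hc hs0 hs1
            rcases List.mem_cons.mp hr with rfl | hr'
            · rw [e1] at hc; have := Option.some.inj hc; omega
            · exact absurd ⟨hs0, hs1⟩ (pvBelowMax_none road lane sec rest (idx + 1) e2 r hr' s hc)
        | some q =>
          rw [e2] at h
          obtain ⟨hq1, hq2, hq3⟩ := ih (idx + 1) q e2
          simp only [pvMergeB] at h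
          by_cases hlt : q.1 > s0
          · rw [if_pos hlt] at h
            have hp : p = q := (Option.some.inj h).symm
            subst hp
            refine ⟨hq1, ?_, ?_⟩
            · rw [pvFindCand, if_neg (by rw [e1]; intro hx; have := Option.some.inj hx; omega)]
              exact hq2
            · intro r hr s hc hs0 hs1
              rcases List.mem_cons.mp hr with rfl | hr'
              · rw [e1] at hc; have := Option.some.inj hc; omega
              · exact hq3 r hr' s hc hs0 hs1
          · rw [if_neg hlt] at h
            have hp : p = (s0, idx) := (Option.some.inj h).symm
            subst hp
            refine ⟨hg, ?_, ?_⟩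
            · rw [pvFindCand, if_pos e1]
            · intro r hr s hc hs0 hs1
              rcases List.mem_cons.mp hr with rfl | hr'
              · rw [e1] at hc; have := Option.some.inj hc; omega
              · have := hq3 r hr' s hc hs0 hs1; simp; omega
      · rw [if_neg hg] at h
        simp only [pvMergeB] at h
        obtain ⟨h1, h2, h3⟩ := ih (idx + 1) p h
        refine ⟨h1, ?_, ?_⟩
        · rw [pvFindCand, if_neg (by rw [e1]; intro hx; have := Option.some.inj hx; omega)]
          exact h2
        · intro r hr s hc hs0 hs1
          rcases List.mem_cons.mp hr with rfl | hr'
          · rw [e1] at hc; have := Option.some.inj hc; omega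
          · exact h3 r hr' s hc hs0 hs1

-- first hit of findSome? along an ordered probe list
theorem findSome?_first {α β : Type} (r : α → α → Prop) (f : α → Option β) :
    ∀ (l : List α), l.Pairwise r → ∀ (x : α) (v : β), x ∈ l → f x = some v →
    (∀ y ∈ l, r y x → f y = none) → l.findSome? f = some v := by
  intro l
  induction l with
  | nil => intro _ x v hx; simp at hx
  | cons h t ih =>
    intro hp x v hx hf hnone
    rcases List.mem_cons.mp hx with rfl | hx'
    · rw [List.findSome?_cons, hf]
    · have hfh : f h = none :=
        hnone h (List.mem_cons_self) ((List.pairwise_cons.mp hp).1 x hx')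
      rw [List.findSome?_cons, hfh]
      exact ih (List.pairwise_cons.mp hp).2 x v hx' hf
        (fun y hy hr => hnone y (List.mem_cons_of_mem _ hy) hr)

theorem findSome?_none {α β : Type} (f : α → Option β) :
    ∀ (l : List α), (∀ x ∈ l, f x = none) → l.findSome? f = none := by
  intro l
  induction l with
  | nil => intro _; rfl
  | cons h t ih =>
    intro hall
    rw [List.findSome?_cons, hall h (List.mem_cons_self)]
    exact ih fun x hx => hall x (List.mem_cons_of_mem _ hx)

-- ===== VERDICT (by name: the statement is the Claim_ definition above) =====
theorem lookup_table_search_spec : Claim_equal_lookup_table_search := by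
  intro road sec lane table fr _hDom hPre
  unfold Spec_lookup_table_search lookup_table_search_alt
  have hPre' : ∀ row ∈ table, pvRowOK road row := hPre
  rw [altLoop_eq]
  rw [lookup_table_search, pvFindRow_eq road sec lane table (-1) hPre']
  have hm1 : (-1 : Int) + 1 = 0 := by norm_num
  rw [hm1]
  cases hf : pvFindCand road lane sec table 0 with
  | some j => simp
  | none =>
    cases fr with
    | false => simp
    | true =>
      simp only [if_true]
      have hfun : (fun i => lookup_table_search road i lane table false) =
          fun i => pvFindCand road lane i table 0 :=
        funext fun i => lts_false_eq road i lane table hPre'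
      rw [hfun]
      cases ha : pvAboveMin road lane sec table 0 with
      | some p =>
        obtain ⟨hps, hpf, hpmin⟩ := pvAboveMin_some road lane sec table 0 p ha
        have hmem : p.1 ∈ PySem.List.pyRange (sec + 1) (find_max_lane_section road table + 1) 1 := by
          rw [PySem.List.mem_pyRange_one]
          obtain ⟨r, hr, hcr⟩ := pvFindCand_some road lane p.1 table 0 p.2 hpf
          have := fmax_ge road lane table r hr p.1 hcr
          omega
        have hforward :
            (PySem.List.pyRange (sec + 1) (find_max_lane_section road table + 1) 1).findSome?
              (fun i => pvFindCand road lane i table 0) = some p.2 := by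
          refine findSome?_first (· < ·) _ _ (PySem.List.pairwise_lt_pyRange_one _ _) p.1 p.2 hmem hpf ?_
          intro y hy hlt
          rw [PySem.List.mem_pyRange_one] at hy
          cases hc : pvFindCand road lane y table 0 with
          | none => rfl
          | some j =>
            exfalso
            obtain ⟨r, hr, hcr⟩ := pvFindCand_some road lane y table 0 j hc
            have := hpmin r hr y hcr (by omega)
            omega
        simp [hforward, pvMergeA]
      | none =>
        have hnoAbove := pvAboveMin_none road lane sec table 0 ha
        have hforward :
            (PySem.List.pyRange (sec + 1) (find_max_lane_section road table + 1) 1).findSome?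
              (fun i => pvFindCand road lane i table 0) = none := by
          refine findSome?_none _ _ fun x hx => ?_
          rw [PySem.List.mem_pyRange_one] at hx
          cases hc : pvFindCand road lane x table 0 with
          | none => rfl
          | some j =>
            exfalso
            obtain ⟨r, hr, hcr⟩ := pvFindCand_some road lane x table 0 j hc
            exact hnoAbove r hr x hcr (by omega)
        have hpairb : (PySem.List.pyRange (sec - 1) (-1) (-1)).Pairwise (· > ·) := by
          rw [PySem.List.pyRange_neg_one_eq_reverse]
          exact List.pairwise_reverse.mpr (PySem.List.pairwise_lt_pyRange_one _ _)
        cases hb : pvBelowMax road lane sec table 0 with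
        | some p =>
          obtain ⟨hps, hpf, hpmin⟩ := pvBelowMax_some road lane sec table 0 p hb
          have hmem : p.1 ∈ PySem.List.pyRange (sec - 1) (-1) (-1) := by
            rw [PySem.List.mem_pyRange_neg_one]
            omega
          have hbackward :
              (PySem.List.pyRange (sec - 1) (-1) (-1)).findSome?
                (fun i => pvFindCand road lane i table 0) = some p.2 := by
            refine findSome?_first (· > ·) _ _ hpairb p.1 p.2 hmem hpf ?_
            intro y hy hlt
            rw [PySem.List.mem_pyRange_neg_one] at hy
            cases hc : pvFindCand road lane y table 0 with
            | none => rfl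
            | some j =>
              exfalso
              obtain ⟨r, hr, hcr⟩ := pvFindCand_some road lane y table 0 j hc
              have := hpmin r hr y hcr (by omega) (by omega)
              omega
          simp [hforward, hbackward, pvMergeA, pvMergeB]
        | none =>
          have hnoBelow := pvBelowMax_none road lane sec table 0 hb
          have hbackward :
              (PySem.List.pyRange (sec - 1) (-1) (-1)).findSome?
                (fun i => pvFindCand road lane i table 0) = none := by
            refine findSome?_none _ _ fun x hx => ?_
            rw [PySem.List.mem_pyRange_neg_one] at hx
            cases hc : pvFindCand road lane x table 0 with
            | none => rfl
            | some j =>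
              exfalso
              obtain ⟨r, hr, hcr⟩ := pvFindCand_some road lane x table 0 j hc
              exact hnoBelow r hr x hcr ⟨by omega, by omega⟩
          simp [hforward, hbackward, pvMergeA, pvMergeB]
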